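-- pv_equiv track=rewrite | github.com/DansiDanutz/ZmartBot | zmart-api/src/services/ai_analysis_agent.py | _extract_report_components
-- ===== SOURCE A (Python) =====
-- from typing import Dict, List, Any, Optional
--
-- def _extract_report_components(report_content: str) -> tuple[str, List[str], List[str]]:
--     """Extract summary, recommendations, and risk factors from report"""
--
--     lines = report_content.split('\n')
--
--     # Extract summary (first few sentences)
--     summary_lines = []
--     for line in lines:
--         if line.strip() and not line.startswith('#'):
--             summary_lines.append(line.strip())
--             if len(' '.join(summary_lines)) > 200:
--                 break
--     summary = ' '.join(summary_lines)[:300] + "..."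
--
--     # Extract recommendations (look for recommendation sections)
--     recommendations = []
--     in_recommendations = False
--     for line in lines:
--         if 'recommendation' in line.lower() or 'trading' in line.lower():
--             in_recommendations = True
--         elif in_recommendations and line.strip().startswith('-'):
--             recommendations.append(line.strip()[1:].strip())
--         elif in_recommendations and line.strip().startswith('#'):
--             in_recommendations = False
--
--     # Extract risk factors
--     risk_factors = []
--     in_risk = False
--     for line in lines:
--         if 'risk' in line.lower():
--             in_risk = True
--         elif in_risk and line.strip().startswith('-'):
--             risk_factors.append(line.strip()[1:].strip())
--         elif in_risk and line.strip().startswith('#'):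
--             in_risk = False
--
--     return summary, recommendations, risk_factors
-- ===== SOURCE B (Python) =====
-- def _extract_report_components(report_content: str):
--     summary_lines = []
--     summary_done = False
--     recommendations = []
--     in_recommendations = False
--     risk_factors = []
--     in_risk = False
--     for line in report_content.split('\n'):
--         low = line.lower()
--         s = line.strip()
--         if not summary_done and s and not line.startswith('#'):
--             summary_lines.append(s)
--             if len(' '.join(summary_lines)) > 200:
--                 summary_done = True
--         if 'recommendation' in low or 'trading' in low:
--             in_recommendations = True
--         elif in_recommendations and s.startswith('-'):
--             recommendations.append(s[1:].strip())
--         elif in_recommendations and s.startswith('#'):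
--             in_recommendations = False
--         if 'risk' in low:
--             in_risk = True
--         elif in_risk and s.startswith('-'):
--             risk_factors.append(s[1:].strip())
--         elif in_risk and s.startswith('#'):
--             in_risk = False
--     summary = ' '.join(summary_lines)[:300] + "..."
--     return summary, recommendations, risk_factors
-- ===== Notes on version B (the rewrite author's own statement) =====
-- stated objective: alternative
-- what changed: Replaced A's three separate passes over the line list (summary with an early break, recommendations, risk factors) by a single fused loop that updates all three accumulators and their state flags at once, with a summary_done flag replacing the break.
import Mathlib
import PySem

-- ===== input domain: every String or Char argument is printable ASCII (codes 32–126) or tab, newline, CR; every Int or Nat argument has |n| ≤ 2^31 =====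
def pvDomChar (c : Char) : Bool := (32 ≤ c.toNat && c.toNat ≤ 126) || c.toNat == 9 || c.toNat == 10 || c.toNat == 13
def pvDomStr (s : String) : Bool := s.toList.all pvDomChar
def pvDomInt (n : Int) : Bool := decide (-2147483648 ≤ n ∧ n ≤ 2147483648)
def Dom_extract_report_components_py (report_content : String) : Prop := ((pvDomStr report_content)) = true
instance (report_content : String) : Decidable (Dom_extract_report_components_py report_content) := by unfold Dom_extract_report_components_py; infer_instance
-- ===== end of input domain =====

-- B replaces A's three separate passes over the line list by one fused pass updating all three
-- accumulators at once (a summary_done flag replaces A's break); alternative decomposition, same cost.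

-- ===== PORT A =====
-- A: three separate passes over the lines.

-- summary loop: append stripped non-empty non-'#' lines, break once the join exceeds 200
def pvSummaryLoopA : List String → List String → List String
  | [], acc => acc
  | l :: rest, acc =>
    if PySem.Str.strip l ≠ "" ∧ ¬ (PySem.Str.startswith l "#" = true) then
      let acc' := acc ++ [PySem.Str.strip l]
      if PySem.Str.len (PySem.Str.join " " acc') > 200 then acc'
      else pvSummaryLoopA rest acc'
    else pvSummaryLoopA rest acc

-- recommendations loop
def pvRecLoopA : List String → Bool → List String → List String
  | [], _, acc => acc
  | l :: rest, inR, acc =>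
    if PySem.Str.isIn "recommendation" (PySem.Str.lower l) = true ∨
       PySem.Str.isIn "trading" (PySem.Str.lower l) = true then
      pvRecLoopA rest true acc
    else if inR = true ∧ PySem.Str.startswith (PySem.Str.strip l) "-" = true then
      pvRecLoopA rest inR (acc ++ [PySem.Str.strip (PySem.Str.slice (PySem.Str.strip l) (some 1) none)])
    else if inR = true ∧ PySem.Str.startswith (PySem.Str.strip l) "#" = true then
      pvRecLoopA rest false acc
    else pvRecLoopA rest inR acc

-- risk-factor loop
def pvRiskLoopA : List String → Bool → List String → List String
  | [], _, acc => acc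
  | l :: rest, inK, acc =>
    if PySem.Str.isIn "risk" (PySem.Str.lower l) = true then
      pvRiskLoopA rest true acc
    else if inK = true ∧ PySem.Str.startswith (PySem.Str.strip l) "-" = true then
      pvRiskLoopA rest inK (acc ++ [PySem.Str.strip (PySem.Str.slice (PySem.Str.strip l) (some 1) none)])
    else if inK = true ∧ PySem.Str.startswith (PySem.Str.strip l) "#" = true then
      pvRiskLoopA rest false acc
    else pvRiskLoopA rest inK acc

def extract_report_components_py (report_content : String) : String × List String × List String :=
  let lines := (PySem.Str.split? report_content "\n").getD []
  let summary_lines := pvSummaryLoopA lines []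
  let summary := (PySem.Str.slice (PySem.Str.join " " summary_lines) none (some 300)) ++ "..."
  let recommendations := pvRecLoopA lines false []
  let risk_factors := pvRiskLoopA lines false []
  (summary, recommendations, risk_factors)

-- ===== PORT B =====
-- B: ONE fused pass; state = (summary_lines, summary_done, recommendations, in_recommendations, risk_factors, in_risk)

def pvFusedStepSummary (l : String) : List String × Bool → List String × Bool
  | (sl, sdone) =>
    if sdone = false ∧ PySem.Str.strip l ≠ "" ∧ ¬ (PySem.Str.startswith l "#" = true) then
      let sl' := sl ++ [PySem.Str.strip l]
      (sl', if PySem.Str.len (PySem.Str.join " " sl') > 200 then true else false)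
    else (sl, sdone)

def pvFusedStepSection (kick : String → Bool) (l : String) : List String × Bool → List String × Bool
  | (acc, inS) =>
    if kick l = true then (acc, true)
    else if inS = true ∧ PySem.Str.startswith (PySem.Str.strip l) "-" = true then
      (acc ++ [PySem.Str.strip (PySem.Str.slice (PySem.Str.strip l) (some 1) none)], inS)
    else if inS = true ∧ PySem.Str.startswith (PySem.Str.strip l) "#" = true then (acc, false)
    else (acc, inS)

def pvRecKick (l : String) : Bool :=
  PySem.Str.isIn "recommendation" (PySem.Str.lower l) || PySem.Str.isIn "trading" (PySem.Str.lower l)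

def pvRiskKick (l : String) : Bool := PySem.Str.isIn "risk" (PySem.Str.lower l)

def pvFusedLoopB : List String → (List String × Bool) → (List String × Bool) → (List String × Bool) →
    List String × List String × List String
  | [], (sl, _), (recs, _), (risks, _) => (sl, recs, risks)
  | l :: rest, sst, rst, kst =>
    pvFusedLoopB rest (pvFusedStepSummary l sst) (pvFusedStepSection pvRecKick l rst)
      (pvFusedStepSection pvRiskKick l kst)

def extract_report_components_py_alt (report_content : String) : String × List String × List String :=
  let lines := (PySem.Str.split? report_content "\n").getD []
  let (sl, recs, risks) := pvFusedLoopB lines ([], false) ([], false) ([], false)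
  ((PySem.Str.slice (PySem.Str.join " " sl) none (some 300)) ++ "...", recs, risks)

-- ===== PRECONDITION & SPEC =====
def Spec_extract_report_components_py (report_content : String) (out : String × List String × List String) : Prop := out = extract_report_components_py_alt report_content
instance (report_content : String) (out : String × List String × List String) : Decidable (Spec_extract_report_components_py report_content out) := by unfold Spec_extract_report_components_py; infer_instance

-- ===== CLAIM (what is proved, stated in full; the proofs are below) =====
def Claim_equal_extract_report_components_py : Prop := ∀ (report_content : String), Dom_extract_report_components_py report_content → Spec_extract_report_components_py report_content (extract_report_components_py report_content)

-- ===== LEMMAS AND PROOFS =====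

-- one fused summary step equals one step (or the stopped state) of A's summary loop
lemma pvSummaryStep (l : String) (rest : List String) (sl : List String) (sdone : Bool) :
    (if (pvFusedStepSummary l (sl, sdone)).2 then (pvFusedStepSummary l (sl, sdone)).1
      else pvSummaryLoopA rest (pvFusedStepSummary l (sl, sdone)).1)
      = (if sdone then sl else pvSummaryLoopA (l :: rest) sl) := by
  cases sdone with
  | true => simp [pvFusedStepSummary]
  | false =>
    simp only [pvFusedStepSummary]
    conv_rhs => rw [pvSummaryLoopA]
    split_ifs <;> simp_all

-- one fused recommendations step equals one step of A's recommendations loop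
lemma pvRecStep (l : String) (rest : List String) (inR : Bool) (acc : List String) :
    pvRecLoopA rest (pvFusedStepSection pvRecKick l (acc, inR)).2
        (pvFusedStepSection pvRecKick l (acc, inR)).1
      = pvRecLoopA (l :: rest) inR acc := by
  simp only [pvFusedStepSection]
  conv_rhs => rw [pvRecLoopA]
  have hk : (pvRecKick l = true) ↔
      (PySem.Str.isIn "recommendation" (PySem.Str.lower l) = true ∨
        PySem.Str.isIn "trading" (PySem.Str.lower l) = true) := by simp [pvRecKick]
  split_ifs <;> simp_all

-- one fused risk step equals one step of A's risk loop
lemma pvRiskStep (l : String) (rest : List String) (inK : Bool) (acc : List String) :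
    pvRiskLoopA rest (pvFusedStepSection pvRiskKick l (acc, inK)).2
        (pvFusedStepSection pvRiskKick l (acc, inK)).1
      = pvRiskLoopA (l :: rest) inK acc := by
  simp only [pvFusedStepSection]
  conv_rhs => rw [pvRiskLoopA]
  have hk : (pvRiskKick l = true) ↔ (PySem.Str.isIn "risk" (PySem.Str.lower l) = true) := by
    simp [pvRiskKick]
  split_ifs <;> simp_all

-- the fused loop computes exactly the three independent loops of A
lemma pvFused_eq (ls : List String) (p q r : List String × Bool) :
    pvFusedLoopB ls p q r =
      ((if p.2 then p.1 else pvSummaryLoopA ls p.1),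
        pvRecLoopA ls q.2 q.1, pvRiskLoopA ls r.2 r.1) := by
  induction ls generalizing p q r with
  | nil =>
    obtain ⟨sl, sdone⟩ := p; obtain ⟨recs, inR⟩ := q; obtain ⟨risks, inK⟩ := r
    cases sdone <;> simp [pvFusedLoopB, pvSummaryLoopA, pvRecLoopA, pvRiskLoopA]
  | cons l rest ih =>
    obtain ⟨sl, sdone⟩ := p; obtain ⟨recs, inR⟩ := q; obtain ⟨risks, inK⟩ := r
    rw [pvFusedLoopB]
    rw [show pvFusedStepSummary l (sl, sdone) =
        ((pvFusedStepSummary l (sl, sdone)).1, (pvFusedStepSummary l (sl, sdone)).2) from rfl,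
      show pvFusedStepSection pvRecKick l (recs, inR) =
        ((pvFusedStepSection pvRecKick l (recs, inR)).1,
          (pvFusedStepSection pvRecKick l (recs, inR)).2) from rfl,
      show pvFusedStepSection pvRiskKick l (risks, inK) =
        ((pvFusedStepSection pvRiskKick l (risks, inK)).1,
          (pvFusedStepSection pvRiskKick l (risks, inK)).2) from rfl,
      ih]
    rw [pvSummaryStep, pvRecStep, pvRiskStep]

-- ===== VERDICT (by name: the statement is the Claim_ definition above) =====
theorem extract_report_components_py_spec : Claim_equal_extract_report_components_py := by
  intro report_content _
  unfold Spec_extract_report_components_py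
  simp only [extract_report_components_py, extract_report_components_py_alt, pvFused_eq,
    Bool.false_eq_true, if_false]
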